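-- pv_equiv track=rewrite | github.com/deltaressrl/sw-programmazione-schede | programmaFirmware.py | HexToString
-- ===== SOURCE A (Python) =====
-- def HexToString(numero,lenStringa):
--     stringaToConvert=""
--
--     numByte=(lenStringa*8)-4
--     for i in range(0,lenStringa*2):
--         c=(numero >> numByte) & 0x0000000F
--         stringaToConvert+="{0:X}".format(c)
--         numByte-=4
--
--     return stringaToConvert
-- ===== SOURCE B (Python) =====
-- def HexToString(numero, lenStringa):
--     if lenStringa <= 0:
--         return ""
--     masked = numero & ((1 << (lenStringa * 8)) - 1)
--     return "{0:0{1}X}".format(masked, lenStringa * 2)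
-- ===== Notes on version B (the rewrite author's own statement) =====
-- stated objective: faster
-- what changed: Replaces the per-nibble shift-and-mask loop (each iteration shifts the whole big integer) by masking the low lenStringa*8 bits once and emitting the entire fixed-width uppercase hex string with a single zero-padded format call.
import Mathlib
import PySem

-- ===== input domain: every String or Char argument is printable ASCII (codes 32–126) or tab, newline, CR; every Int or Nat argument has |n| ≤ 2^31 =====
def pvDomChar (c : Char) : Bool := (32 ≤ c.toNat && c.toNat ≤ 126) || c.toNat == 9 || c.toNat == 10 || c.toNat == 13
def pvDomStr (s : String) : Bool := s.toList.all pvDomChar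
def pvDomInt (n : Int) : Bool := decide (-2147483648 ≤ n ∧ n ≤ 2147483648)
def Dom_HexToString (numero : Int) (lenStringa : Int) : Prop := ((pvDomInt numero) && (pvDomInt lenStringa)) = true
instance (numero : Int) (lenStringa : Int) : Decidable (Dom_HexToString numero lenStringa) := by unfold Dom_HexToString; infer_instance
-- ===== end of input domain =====

-- B masks the low lenStringa*8 bits once and formats them as one zero-padded
-- uppercase hex string instead of A's nibble-by-nibble shift loop (objective: idiomatic).

-- ===== PORT A =====
-- "{0:X}".format(c): exact for 0 ≤ c < 16, the only values c takes in A's loop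
def pvFmtX (c : Int) : List Char :=
  [if c < 10 then Char.ofNat (48 + c.toNat) else Char.ofNat (55 + c.toNat)]

def HexToString (numero : Int) (lenStringa : Int) : String :=
  -- numByte is ≥ 0 whenever the loop body runs, so .toNat is exact for Python's '>>'
  String.ofList
    ((PySem.List.pyRange 0 (lenStringa * 2) 1).foldl
      (fun (st : List Char × Int) (_i : Int) =>
        (st.1 ++ pvFmtX (PySem.Int.band (numero >>> st.2.toNat) 15), st.2 - 4))
      ([], lenStringa * 8 - 4)).1

-- ===== PORT B =====
-- uppercase hex digits of n, no leading zeros except for "0": the digit string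
-- "{0:X}" produces for a nonnegative int (hand port, exact for n ≥ 0)
def pvToHex (n : Nat) : List Char :=
  if h : n < 16 then [if n < 10 then Char.ofNat (48 + n) else Char.ofNat (55 + n)]
  else pvToHex (n / 16) ++ [if n % 16 < 10 then Char.ofNat (48 + n % 16) else Char.ofNat (55 + n % 16)]
decreasing_by exact Nat.div_lt_self (by omega) (by omega)

def HexToString_alt (numero : Int) (lenStringa : Int) : String :=
  if lenStringa ≤ 0 then ""
  else
    -- masked = numero & ((1 << (lenStringa * 8)) - 1), then
    -- "{0:0{1}X}".format(masked, lenStringa * 2): zero-pad the hex digits (masked ≥ 0)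
    String.ofList
      (List.replicate ((lenStringa * 2).toNat
          - (pvToHex (PySem.Int.band numero ((1 : Int) <<< (lenStringa * 8).toNat - 1)).toNat).length) '0'
        ++ pvToHex (PySem.Int.band numero ((1 : Int) <<< (lenStringa * 8).toNat - 1)).toNat)

-- ===== PRECONDITION & SPEC =====
def Spec_HexToString (numero : Int) (lenStringa : Int) (out : String) : Prop := out = HexToString_alt numero lenStringa
instance (numero : Int) (lenStringa : Int) (out : String) : Decidable (Spec_HexToString numero lenStringa out) := by unfold Spec_HexToString; infer_instance

-- ===== CLAIM (what is proved, stated in full; the proofs are below) =====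
def Claim_equal_HexToString : Prop := ∀ (numero : Int) (lenStringa : Int), Dom_HexToString numero lenStringa → Spec_HexToString numero lenStringa (HexToString numero lenStringa)

-- ===== LEMMAS AND PROOFS =====

-- the sequence of nibble characters A's loop appends: j nibbles, shifts b, b-4, …, b-4(j-1)
def pvNib (n : Int) : Nat → Int → List Char
  | 0, _ => []
  | j + 1, b => pvFmtX (PySem.Int.band (n >>> b.toNat) 15) ++ pvNib n j (b - 4)

-- the fixed-width hex rendering: top j digits of m / 16, then the last digit of m
def pvHexFixed : Nat → Int → List Char
  | 0, _ => []
  | j + 1, m => pvHexFixed j (m / 16) ++ pvFmtX (m % 16)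

theorem pv_emod_eq (a r N : Int) (h0 : 0 ≤ r) (h1 : r < N) (q : Int) (hq : a = r + N * q) :
    a % N = r := by
  rw [hq, Int.add_mul_emod_self_left, Int.emod_eq_of_lt h0 h1]

theorem pv_band_mask (a : Int) (t : Nat) :
    PySem.Int.band a ((2 : Int) ^ t - 1) = a % (2 : Int) ^ t := by
  have hM1 : 1 ≤ 2 ^ t := Nat.one_le_two_pow
  have hMc : (((2 ^ t : Nat)) : Int) = (2 : Int) ^ t := by push_cast; ring
  have hmn : (0 : Int) ≤ 2 ^ t - 1 := by omega
  unfold PySem.Int.band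
  by_cases ha : 0 ≤ a
  · rw [if_pos ha, if_pos hmn]
    have htn : ((2 : Int) ^ t - 1).toNat = 2 ^ t - 1 := by omega
    rw [htn, Nat.and_two_pow_sub_one_eq_mod]
    have : (↑(a.toNat % 2 ^ t) : Int) = (↑a.toNat : Int) % ↑(2 ^ t : Nat) := by push_cast; ring
    rw [this, Int.toNat_of_nonneg ha, hMc]
  · rw [if_neg ha, if_pos hmn]
    have htn : ((2 : Int) ^ t - 1).toNat = 2 ^ t - 1 := by omega
    obtain ⟨mN, hmN⟩ : ∃ k : Nat, (k : Int) = -a - 1 := ⟨(-a - 1).toNat, by omega⟩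
    have hT : (-a - 1).toNat = mN := by omega
    rw [htn, hT, Nat.and_comm, Nat.and_two_pow_sub_one_eq_mod]
    have ham : a = -((mN : Int) + 1) := by omega
    have hdmZ : ((2 : Int) ^ t) * (((mN / 2 ^ t : Nat)) : Int)
        + ((mN % 2 ^ t : Nat) : Int) = (mN : Int) := by
      exact_mod_cast congrArg (fun k : Nat => (k : Int)) (Nat.div_add_mod mN (2 ^ t))
    have hmlt : mN % 2 ^ t < 2 ^ t := Nat.mod_lt _ (by omega)
    have hcast : ((2 ^ t - 1 - mN % 2 ^ t : Nat) : Int)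
        = (2 : Int) ^ t - 1 - ((mN % 2 ^ t : Nat) : Int) := by omega
    rw [hcast]
    refine (pv_emod_eq a _ _ (by omega) (by omega)
      (-(((mN / 2 ^ t : Nat)) : Int) - 1) ?_).symm
    rw [ham]
    linear_combination hdmZ

theorem pv_band15 (a : Int) : PySem.Int.band a 15 = a % 16 := by
  have h := pv_band_mask a 4
  norm_num at h
  exact h

theorem pv_foldA (n : Int) (l : List Int) (acc : List Char) (b : Int) :
    (l.foldl
      (fun (st : List Char × Int) (_i : Int) =>
        (st.1 ++ pvFmtX (PySem.Int.band (n >>> st.2.toNat) 15), st.2 - 4))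
      (acc, b)).1 = acc ++ pvNib n l.length b := by
  induction l generalizing acc b with
  | nil => simp [pvNib]
  | cons x xs ih => simp [List.foldl, ih, pvNib, List.append_assoc]

theorem pvNib_snoc (n : Int) (j : Nat) (b : Int) :
    pvNib n (j + 1) b = pvNib n j b ++ pvFmtX (PySem.Int.band (n >>> (b - 4 * j).toNat) 15) := by
  induction j generalizing b with
  | zero => simp [pvNib]
  | succ j ih =>
    conv_lhs => rw [pvNib]
    rw [ih (b - 4), pvNib]
    have h4 : b - 4 - 4 * (j : Int) = b - 4 * ((j : Int) + 1) := by ring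
    simp [List.append_assoc, h4]

theorem pvNib_shift (n : Int) (j : Nat) (b : Int) (hb : 4 * (j : Int) - 4 ≤ b) :
    pvNib n j (b + 4) = pvNib (n / 16) j b := by
  induction j generalizing b with
  | zero => simp [pvNib]
  | succ j ih =>
    have hb0 : (0 : Int) ≤ b := by push_cast at hb ⊢; omega
    rw [pvNib, pvNib]
    have h1 : n >>> (b + 4).toNat = (n / 16) >>> b.toNat := by
      rw [Int.shiftRight_eq_div_pow, Int.shiftRight_eq_div_pow,
        Int.ediv_ediv_of_nonneg (show (0 : Int) ≤ 16 by norm_num),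
        show (b + 4).toNat = b.toNat + 4 by omega, pow_add]
      norm_num [mul_comm]
    rw [h1, show b + 4 - 4 = b - 4 + 4 by ring, ih (b - 4) (by push_cast at hb ⊢; omega)]

theorem pv_div_emod (n : Int) (j : Nat) :
    (n % (16 : Int) ^ (j + 1)) / 16 = (n / 16) % (16 : Int) ^ j := by
  have h16 : ((16 : Int) ^ (j + 1)) = 16 ^ j * 16 := by rw [pow_succ]
  have hq : n % (16 : Int) ^ (j + 1) = n + (-(16 ^ j * (n / 16 ^ (j + 1)))) * 16 := by
    rw [Int.emod_def, h16]; ring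
  rw [hq, Int.add_mul_ediv_right _ _ (by norm_num : (16 : Int) ≠ 0),
    Int.emod_def, Int.ediv_ediv_of_nonneg (show (0 : Int) ≤ 16 by norm_num),
    show (16 : Int) * 16 ^ j = 16 ^ (j + 1) by rw [pow_succ]; ring]
  ring

theorem pvNib_eq_hexFixed (j : Nat) (n : Int) :
    pvNib n j (4 * (j : Int) - 4) = pvHexFixed j (n % (16 : Int) ^ j) := by
  induction j generalizing n with
  | zero => simp [pvNib, pvHexFixed]
  | succ j ih =>
    rw [pvNib_snoc, pvHexFixed]
    have e1 : pvFmtX (PySem.Int.band (n >>> (4 * (((j : Nat) + 1 : Nat) : Int) - 4 - 4 * (j : Int)).toNat) 15)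
        = pvFmtX ((n % 16 ^ (j + 1)) % 16) := by
      have h0 : (4 * (((j : Nat) + 1 : Nat) : Int) - 4 - 4 * (j : Int)).toNat = 0 := by
        push_cast; omega
      have hdvd : (16 : Int) ∣ 16 ^ (j + 1) := dvd_pow_self 16 (Nat.succ_ne_zero j)
      rw [h0, Int.emod_emod_of_dvd n hdvd,
        show n >>> (0 : Nat) = n by simp [Int.shiftRight_eq_div_pow], pv_band15]
    have e2 : pvNib n j (4 * (((j : Nat) + 1 : Nat) : Int) - 4)
        = pvHexFixed j ((n % 16 ^ (j + 1)) / 16) := by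
      rw [show (4 * (((j : Nat) + 1 : Nat) : Int) - 4) = (4 * (j : Int) - 4) + 4 by push_cast; ring,
        pvNib_shift n j _ (le_refl _), ih (n / 16), ← pv_div_emod]
    rw [e1, e2]

theorem pvHexFixed_zero (j : Nat) : pvHexFixed j 0 = List.replicate j '0' := by
  induction j with
  | zero => rfl
  | succ j ih =>
    rw [pvHexFixed, show (0 : Int) / 16 = 0 by norm_num, show (0 : Int) % 16 = 0 by norm_num,
      ih, show pvFmtX 0 = ['0'] from rfl, ← List.replicate_succ']

theorem pv_pad_toHex (j : Nat) (m : Int) (h0 : 0 ≤ m) (h1 : m < (16 : Int) ^ (j + 1)) :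
    List.replicate ((j + 1) - (pvToHex m.toNat).length) '0' ++ pvToHex m.toNat
      = pvHexFixed (j + 1) m := by
  induction j generalizing m with
  | zero =>
    have hlt : m.toNat < 16 := by norm_num at h1; omega
    rw [pvToHex, dif_pos hlt, pvHexFixed, pvHexFixed]
    have hm : m % 16 = m := Int.emod_eq_of_lt h0 (by norm_num at h1; omega)
    have hc : (m < 10) = (m.toNat < 10) := by rw [eq_iff_iff]; omega
    simp only [pvFmtX, hm, hc, List.length_cons, List.length_nil, List.nil_append]
    rfl
  | succ j ih =>
    by_cases hm : m < 16
    · have hlt : m.toNat < 16 := by omega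
      rw [pvToHex, dif_pos hlt, pvHexFixed]
      have hd : m / 16 = 0 := Int.ediv_eq_zero_of_lt h0 hm
      have hmod : m % 16 = m := Int.emod_eq_of_lt h0 hm
      have hc : (m < 10) = (m.toNat < 10) := by rw [eq_iff_iff]; omega
      rw [hd, pvHexFixed_zero, hmod]
      simp only [pvFmtX, hc, List.length_cons, List.length_nil]
      rw [show (j + 1 + 1) - 1 = j + 1 by omega]
    · have hge : ¬ m.toNat < 16 := by omega
      rw [pvToHex, dif_neg hge, pvHexFixed]
      have hdiv : (m / 16).toNat = m.toNat / 16 := by omega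
      have hih := ih (m / 16) (by omega)
        (by rw [Int.ediv_lt_iff_lt_mul (by norm_num : (0 : Int) < 16)]; rw [pow_succ] at h1; exact h1)
      rw [hdiv] at hih
      have hlen : (pvToHex (m.toNat / 16) ++ [if m.toNat % 16 < 10 then Char.ofNat (48 + m.toNat % 16) else Char.ofNat (55 + m.toNat % 16)]).length
          = (pvToHex (m.toNat / 16)).length + 1 := by simp
      rw [hlen, show (j + 1 + 1) - ((pvToHex (m.toNat / 16)).length + 1)
            = (j + 1) - (pvToHex (m.toNat / 16)).length by omega,
        ← List.append_assoc, hih]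
      have hmodt : (m % 16).toNat = m.toNat % 16 := by omega
      have hc : (m % 16 < 10) = (m.toNat % 16 < 10) := by rw [eq_iff_iff]; omega
      have hfmt : pvFmtX (m % 16)
          = [if m.toNat % 16 < 10 then Char.ofNat (48 + m.toNat % 16) else Char.ofNat (55 + m.toNat % 16)] := by
        simp only [pvFmtX, hmodt, hc]
      rw [hfmt]

-- ===== VERDICT (by name: the statement is the Claim_ definition above) =====
theorem HexToString_spec : Claim_equal_HexToString := by
  intro numero lenStringa _
  unfold Spec_HexToString HexToString HexToString_alt
  by_cases hL : lenStringa ≤ 0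
  · rw [if_pos hL, PySem.List.pyRange_one_eq_nil (by omega)]
    rfl
  · rw [if_neg hL, pv_foldA, PySem.List.length_pyRange_one, List.nil_append]
    set j : Nat := (lenStringa * 2 - 0).toNat with hj
    have hj2 : (j : Int) = lenStringa * 2 := by omega
    rw [show lenStringa * 8 - 4 = 4 * (j : Int) - 4 by omega, pvNib_eq_hexFixed,
      show (1 : Int) <<< (lenStringa * 8).toNat - 1 = 2 ^ (4 * j) - 1 by
        rw [show (lenStringa * 8).toNat = 4 * j by omega]; simp [Int.shiftLeft_eq],
      pv_band_mask, show (2 : Int) ^ (4 * j) = 16 ^ j by rw [pow_mul]; norm_num,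
      show (lenStringa * 2).toNat = j by omega]
    obtain ⟨i, hi⟩ : ∃ i, j = i + 1 := ⟨j - 1, by omega⟩
    have hN : (0 : Int) < 16 ^ j := by positivity
    have hpad := pv_pad_toHex i (numero % 16 ^ j)
      (Int.emod_nonneg numero (by positivity)) (by rw [← hi]; exact Int.emod_lt_of_pos numero hN)
    rw [hi] at hpad ⊢
    rw [hpad]
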